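-- pv_equiv track=rewrite | github.com/dishantzaveri/sem6allpracs | INSPracs/ownalgo.py | pbox_permutation
-- ===== SOURCE A (Python) =====
-- def pbox_permutation(s):
--   s_list = list(s)
--   n = len(s_list)
--   i = 0
--   j = n - 1
--   while i < j:
--     s_list[i] , s_list[j] = s_list[j] , s_list[i]
--     i += 2
--     j -= 2
--   return "".join(s_list)
-- ===== SOURCE B (Python) =====
-- def pbox_permutation(s):
--   n = len(s)
--   return "".join(
--     s[n - 1 - p] if min(p, n - 1 - p) % 2 == 0 and p != n - 1 - p else s[p]
--     for p in range(n)
--   )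
-- ===== Notes on version B (the rewrite author's own statement) =====
-- stated objective: alternative
-- what changed: Replaced the in-place two-pointer step-2 swapping loop with a stateless per-position closed-form index mapping (each output position reads directly from its source index via a comprehension).
import Mathlib
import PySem

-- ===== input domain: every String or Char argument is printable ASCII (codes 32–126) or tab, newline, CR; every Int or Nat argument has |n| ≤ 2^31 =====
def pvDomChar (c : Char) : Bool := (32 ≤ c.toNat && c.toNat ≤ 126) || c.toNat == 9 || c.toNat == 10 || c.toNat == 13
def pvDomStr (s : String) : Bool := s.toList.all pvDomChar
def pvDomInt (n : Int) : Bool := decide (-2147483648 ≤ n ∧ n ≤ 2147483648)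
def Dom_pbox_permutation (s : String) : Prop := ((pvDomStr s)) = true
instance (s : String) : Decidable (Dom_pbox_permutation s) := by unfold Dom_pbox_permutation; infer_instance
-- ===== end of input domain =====

-- B replaces A's in-place two-pointer swapping loop with a stateless per-position
-- closed-form index mapping (objective: alternative decomposition, same cost).

-- ===== PORT A =====
-- swap of the two positions, reading both old values first (Python tuple assignment)
def pvSwapA (l : List Char) (i j : Nat) : List Char :=
  (l.set i (l.getD j ' ')).set j (l.getD i ' ')

-- the while loop: while i < j: swap; i += 2; j -= 2
def pvLoopA (l : List Char) (i j : Int) : List Char :=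
  if i < j then pvLoopA (pvSwapA l i.toNat j.toNat) (i + 2) (j - 2) else l
termination_by (j - i).toNat
decreasing_by omega

def pbox_permutation (s : String) : String :=
  let s_list := s.toList
  let n : Int := s_list.length
  String.mk (pvLoopA s_list 0 (n - 1))

-- ===== PORT B =====
def pbox_permutation_alt (s : String) : String :=
  let l := s.toList
  let n := l.length
  String.mk ((List.range n).map (fun p =>
    if min p (n - 1 - p) % 2 = 0 ∧ p ≠ n - 1 - p then l.getD (n - 1 - p) ' '
    else l.getD p ' '))

-- ===== PRECONDITION & SPEC =====
def Spec_pbox_permutation (s : String) (out : String) : Prop := out = pbox_permutation_alt s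
instance (s : String) (out : String) : Decidable (Spec_pbox_permutation s out) := by unfold Spec_pbox_permutation; infer_instance

-- ===== CLAIM (what is proved, stated in full; the proofs are below) =====
def Claim_equal_pbox_permutation : Prop := ∀ (s : String), Dom_pbox_permutation s → Spec_pbox_permutation s (pbox_permutation s)

-- ===== LEMMAS AND PROOFS =====
theorem pvSwapA_length (l : List Char) (i j : Nat) : (pvSwapA l i j).length = l.length := by
  simp [pvSwapA]

theorem pvLoopA_length (l : List Char) (i j : Int) : (pvLoopA l i j).length = l.length := by
  fun_induction pvLoopA with
  | case1 l i j h ih => rw [ih, pvSwapA_length]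
  | case2 l i j h => rfl

theorem pvSwapA_getD (l : List Char) (i j q : Nat) (hq : q < l.length) :
    (pvSwapA l i j).getD q ' ' =
      if q = j then l.getD i ' ' else if q = i then l.getD j ' ' else l.getD q ' ' := by
  rw [pvSwapA, List.getD_eq_getElem _ ' ' (by simpa using hq)]
  rw [List.getElem_set, List.getElem_set]
  split_ifs <;> first | rfl | omega | exact (List.getD_eq_getElem l ' ' hq).symm

-- invariant of A's loop: position p of the result holds l[n-1-p] exactly when the
-- pair (min p (n-1-p), n-1-min) is a not-yet-done even-indexed swap pair
theorem pvLoopA_getD (k : Nat) : ∀ (i : Nat) (l : List Char), l.length - i ≤ k → i % 2 = 0 →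
    ∀ p, p < l.length →
    (pvLoopA l (i : Int) ((l.length : Int) - 1 - (i : Int))).getD p ' ' =
      if min p (l.length - 1 - p) % 2 = 0 ∧ i ≤ min p (l.length - 1 - p) ∧ p ≠ l.length - 1 - p
      then l.getD (l.length - 1 - p) ' ' else l.getD p ' ' := by
  induction k with
  | zero =>
    intro i l hk hev p hp
    rw [pvLoopA]
    rw [if_neg (by omega)]
    rw [if_neg (by omega)]
  | succ k ih =>
    intro i l hk hev p hp
    by_cases hlt : (i : Int) < (l.length : Int) - 1 - (i : Int)
    · rw [pvLoopA, if_pos hlt]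
      have h2i : 2 * i + 1 < l.length := by omega
      set n := l.length with hn
      have hiN : (i : Int).toNat = i := by omega
      have hjN : ((n : Int) - 1 - (i : Int)).toNat = n - 1 - i := by omega
      rw [hiN, hjN]
      have harg1 : (i : Int) + 2 = ((i + 2 : Nat) : Int) := by push_cast; ring
      have harg2 : (n : Int) - 1 - (i : Int) - 2 = ((pvSwapA l i (n - 1 - i)).length : Int) - 1 - ((i + 2 : Nat) : Int) := by
        rw [pvSwapA_length]; push_cast; omega
      rw [harg1, harg2]
      have hlen : (pvSwapA l i (n - 1 - i)).length = n := by rw [pvSwapA_length]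
      rw [ih (i + 2) (pvSwapA l i (n - 1 - i)) (by omega) (by omega) p (by omega)]
      rw [hlen]
      have hswap : ∀ q, q < n → (pvSwapA l i (n - 1 - i)).getD q ' ' =
          if q = n - 1 - i then l.getD i ' ' else if q = i then l.getD (n - 1 - i) ' '
          else l.getD q ' ' := by
        intro q hq
        exact pvSwapA_getD l i (n - 1 - i) q hq
      by_cases hpi : p = i
      · subst hpi
        rw [if_neg (by omega), if_pos (by constructor; omega; constructor; omega; omega)]
        rw [hswap p hp, if_neg (by omega), if_pos rfl]
      · by_cases hpj : p = n - 1 - i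
        · rw [if_neg (by omega), if_pos (by constructor; omega; constructor; omega; omega)]
          rw [hswap p hp, if_pos hpj, hpj]
          congr 1
          omega
        · have hcond : (min p (n - 1 - p) % 2 = 0 ∧ i + 2 ≤ min p (n - 1 - p) ∧ p ≠ n - 1 - p)
              ↔ (min p (n - 1 - p) % 2 = 0 ∧ i ≤ min p (n - 1 - p) ∧ p ≠ n - 1 - p) := by
            omega
          by_cases hc : min p (n - 1 - p) % 2 = 0 ∧ i ≤ min p (n - 1 - p) ∧ p ≠ n - 1 - p
          · rw [if_pos (hcond.mpr hc), if_pos hc]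
            rw [hswap (n - 1 - p) (by omega), if_neg (by omega), if_neg (by omega)]
          · rw [if_neg (fun h => hc (hcond.mp h)), if_neg hc]
            rw [hswap p hp, if_neg hpj, if_neg hpi]
    · rw [pvLoopA, if_neg hlt, if_neg (by omega)]

-- ===== VERDICT (by name: the statement is the Claim_ definition above) =====
theorem pvLoopA_eq_map (l : List Char) :
    pvLoopA l 0 ((l.length : Int) - 1) =
      (List.range l.length).map (fun p =>
        if min p (l.length - 1 - p) % 2 = 0 ∧ p ≠ l.length - 1 - p
        then l.getD (l.length - 1 - p) ' ' else l.getD p ' ') := by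
  apply List.ext_getElem
  · simp [pvLoopA_length]
  · intro p h1 h2
    have hp : p < l.length := by simpa [pvLoopA_length] using h1
    have hkey := pvLoopA_getD l.length 0 l (by omega) (by omega) p hp
    norm_num at hkey
    rw [← List.getD_eq_getElem _ ' ' h1, List.getD_eq_getElem?_getD, hkey]
    simp only [List.getElem_map, List.getElem_range, List.getD_eq_getElem?_getD, ne_eq]

theorem pbox_permutation_spec : Claim_equal_pbox_permutation := by
  intro s _
  unfold Spec_pbox_permutation pbox_permutation pbox_permutation_alt
  simp only []
  rw [pvLoopA_eq_map s.toList]
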